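-- pv_equiv track=rewrite | github.com/sulcgroup/pypatchy | pypatchy/polycubeutil/design/optimizeYield.py | longest_paths
-- ===== SOURCE A (Python) =====
-- def longest_paths(paths):
--     best = []
--     best_length = 0
--     for p in paths:
--         if len(p) == best_length:
--             best.append(p)
--         elif len(p) > best_length:
--             best = [p]
--             best_length = len(p)
--
--     return best
-- ===== SOURCE B (Python) =====
-- def longest_paths(paths):
--     paths = list(paths)
--     maxlen = max((len(p) for p in paths), default=0)
--     return [p for p in paths if len(p) == maxlen]
-- ===== Notes on version B (the rewrite author's own statement) =====
-- stated objective: simpler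
-- what changed: Replaces A's single running-max-with-reset accumulator loop by a two-pass decomposition: compute the maximum length (default 0 on empty input), then filter the paths tying it with a comprehension.
import Mathlib
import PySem

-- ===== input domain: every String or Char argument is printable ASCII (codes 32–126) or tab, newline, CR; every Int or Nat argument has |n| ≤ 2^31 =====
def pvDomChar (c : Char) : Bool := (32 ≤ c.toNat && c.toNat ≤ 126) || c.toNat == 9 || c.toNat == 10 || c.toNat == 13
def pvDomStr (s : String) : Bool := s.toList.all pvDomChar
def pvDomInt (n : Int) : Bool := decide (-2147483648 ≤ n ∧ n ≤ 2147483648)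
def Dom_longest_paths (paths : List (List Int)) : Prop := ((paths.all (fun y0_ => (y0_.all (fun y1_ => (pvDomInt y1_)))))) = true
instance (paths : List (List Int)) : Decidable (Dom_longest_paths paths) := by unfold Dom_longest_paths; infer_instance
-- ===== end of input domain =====

-- B replaces A's running-max-with-reset loop by a two-pass find-max-then-filter decomposition (same return value).
-- ===== PORT A =====
-- the for-loop over paths with state (best, best_length), branches in A's order
def goA : List (List Int) → List (List Int) → Int → List (List Int)
  | [], best, _ => best
  | p :: rest, best, bl =>
    if (p.length : Int) = bl then goA rest (best ++ [p]) bl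
    else if (p.length : Int) > bl then goA rest [p] (p.length : Int)
    else goA rest best bl

def longest_paths (paths : List (List Int)) : List (List Int) :=
  goA paths [] 0

-- ===== PORT B =====
def longest_paths_alt (paths : List (List Int)) : List (List Int) :=
  let maxlen : Int := (paths.map (fun p => (p.length : Int))).foldl max 0  -- max(…, default=0): lengths are ≥ 0
  paths.filter (fun p => (p.length : Int) = maxlen)

-- ===== PRECONDITION & SPEC =====
def Spec_longest_paths (paths : List (List Int)) (out : List (List Int)) : Prop := out = longest_paths_alt paths
instance (paths : List (List Int)) (out : List (List Int)) : Decidable (Spec_longest_paths paths out) := by unfold Spec_longest_paths; infer_instance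

-- ===== CLAIM (what is proved, stated in full; the proofs are below) =====
def Claim_equal_longest_paths : Prop := ∀ (paths : List (List Int)), Dom_longest_paths paths → Spec_longest_paths paths (longest_paths paths)

-- ===== LEMMAS AND PROOFS =====
-- Loop characterisation: running A's loop from state (best, bl) yields best (kept iff bl is still
-- the overall max) followed by the remaining paths whose length equals the overall max.
theorem goA_char (rest : List (List Int)) : ∀ (best : List (List Int)) (bl : Int),
    goA rest best bl =
      (if (rest.map (fun p => (p.length : Int))).foldl max bl = bl then best else []) ++
        rest.filter (fun p => (p.length : Int) = (rest.map (fun p => (p.length : Int))).foldl max bl) := by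
  induction rest with
  | nil => intro best bl; simp [goA]
  | cons p r ih =>
    intro best bl
    simp only [goA, List.map_cons, List.foldl_cons, List.filter_cons]
    by_cases h1 : (p.length : Int) = bl
    · rw [if_pos h1, ih]
      have hm : max bl (p.length : Int) = bl := by omega
      simp only [hm]
      by_cases h2 : (r.map (fun p => (p.length : Int))).foldl max bl = bl
      · simp [h2, h1]
      · simp [h2]
        intro hc; exact h2 (by omega)
    · rw [if_neg h1]
      by_cases h2 : (p.length : Int) > bl
      · rw [if_pos h2, ih]
        have hm : max bl (p.length : Int) = (p.length : Int) := by omega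
        simp only [hm]
        have hle : (p.length : Int) ≤ (r.map (fun p => (p.length : Int))).foldl max (p.length : Int) :=
          (PySem.List.le_foldl_max _ _).1
        have hne : (r.map (fun p => (p.length : Int))).foldl max (p.length : Int) ≠ bl := by omega
        rw [if_neg hne]
        by_cases h3 : (r.map (fun p => (p.length : Int))).foldl max (p.length : Int) = (p.length : Int)
        · simp [h3]
        · simp [h3]
          intro hc; exact h3 (by omega)
      · rw [if_neg h2, ih]
        have hm : max bl (p.length : Int) = bl := by omega
        simp only [hm]
        have hble : bl ≤ (r.map (fun p => (p.length : Int))).foldl max bl :=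
          (PySem.List.le_foldl_max _ _).1
        have hpne : ¬ ((p.length : Int) = (r.map (fun p => (p.length : Int))).foldl max bl) := by omega
        simp [hpne]

-- ===== VERDICT (by name: the statement is the Claim_ definition above) =====
theorem longest_paths_spec : Claim_equal_longest_paths := by
  intro paths _
  unfold Spec_longest_paths longest_paths longest_paths_alt
  rw [goA_char]
  split <;> simp
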